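-- pv_equiv track=rewrite | github.com/alexishuf/ppgcc-metrics | ppgcc_metrics/names.py | _subsplit
-- ===== SOURCE A (Python) =====
-- def _subsplit(string, outer_sep, inner_sep, keep_inner='LEFT'):
--     result = []
--     for outer in string.split(outer_sep):
--         parts = outer.split(inner_sep)
--         if keep_inner.upper() == 'LEFT':
--             parts = [x+inner_sep for x in parts]
--             parts[-1] = parts[-1][:-len(inner_sep)]
--         elif keep_inner.upper() == 'RIGHT':
--             parts = [inner_sep+x for x in parts]
--             parts[0] = parts[0][len(inner_sep):]
--         result += list(filter(len, parts))
--     return result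
-- ===== SOURCE B (Python) =====
-- def _subsplit(string, outer_sep, inner_sep, keep_inner='LEFT'):
--     # Single left-to-right scan per outer segment: tokens are emitted directly with
--     # the inner separator already attached (LEFT/RIGHT), no intermediate parts list.
--     if not outer_sep or not inner_sep:
--         raise ValueError('empty separator')
--     mode = keep_inner.upper()
--     out = []
--     for seg in string.split(outer_sep):
--         cur = []          # pending characters of the current token
--         i, n = 0, len(seg)
--         while i < n:
--             if seg.startswith(inner_sep, i):
--                 if mode == 'LEFT':
--                     out.append(''.join(cur) + inner_sep)
--                 elif cur:
--                     out.append(''.join(cur))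
--                 cur = [inner_sep] if mode == 'RIGHT' else []
--                 i += len(inner_sep)
--             else:
--                 cur.append(seg[i])
--                 i += 1
--         if cur:
--             out.append(''.join(cur))
--     return out
-- ===== Notes on version B (the rewrite author's own statement) =====
-- stated objective: alternative
-- what changed: Per outer segment, A builds a parts list via split(inner_sep), re-attaches the separator to every part with a map, un-attaches it at one end, and filters empties; B makes a single left-to-right scan of the segment that emits each finished token directly with the separator already glued to the correct side.
-- outside the precondition, e.g. on _subsplit('a,b', '', ',', 'LEFT'): A raises ValueError, B raises ValueError
import Mathlib
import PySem

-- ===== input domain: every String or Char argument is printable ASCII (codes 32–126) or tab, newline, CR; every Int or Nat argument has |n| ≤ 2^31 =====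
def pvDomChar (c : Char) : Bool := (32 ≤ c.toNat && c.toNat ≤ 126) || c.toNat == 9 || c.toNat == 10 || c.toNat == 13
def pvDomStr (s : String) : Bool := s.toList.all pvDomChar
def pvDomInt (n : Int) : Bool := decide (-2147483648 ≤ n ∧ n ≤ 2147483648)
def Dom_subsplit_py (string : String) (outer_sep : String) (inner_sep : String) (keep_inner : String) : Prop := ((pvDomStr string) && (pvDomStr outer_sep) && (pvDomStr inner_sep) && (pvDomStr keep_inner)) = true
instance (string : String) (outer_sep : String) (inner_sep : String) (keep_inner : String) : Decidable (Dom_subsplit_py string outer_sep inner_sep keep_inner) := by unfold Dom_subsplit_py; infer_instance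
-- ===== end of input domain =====

-- B replaces A's per-segment split/attach/trim/filter pipeline by one left-to-right scan that
-- emits finished tokens directly (objective: alternative algorithm, same asymptotic cost).

-- ===== PORT A =====
-- List assignment parts[-1] = … / parts[0] = … is ported as dropLast ++ [·] resp. head
-- replacement; str.split never returns an empty list, so parts[-1]/parts[0] always exist in Python.
def subsplit_py (string : String) (outer_sep : String) (inner_sep : String) (keep_inner : String) : List String :=
  match PySem.Chars.split? string.toList outer_sep.toList with
  | none => []  -- string.split('') raises ValueError; excluded by Pre_
  | some outers =>
    (outers.foldl (fun result outer =>
      match PySem.Chars.split? outer inner_sep.toList with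
      | none => result  -- outer.split('') raises ValueError; excluded by Pre_
      | some parts0 =>
        let parts :=
          if PySem.Chars.upper keep_inner.toList = "LEFT".toList then
            let p := parts0.map (fun x => x ++ inner_sep.toList)
            p.dropLast ++ [PySem.List.slice (p.getLastD []) none (some (-(inner_sep.toList.length : Int)))]
          else if PySem.Chars.upper keep_inner.toList = "RIGHT".toList then
            let p := parts0.map (fun x => inner_sep.toList ++ x)
            match p with
            | [] => []  -- unreachable: split never returns []
            | h :: t => PySem.List.slice h (some (inner_sep.toList.length : Int)) none :: t
          else parts0
        result ++ parts.filter (fun x => !x.isEmpty)) []).map String.ofList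

-- ===== PORT B =====
-- Source B's inner while loop: the index i becomes the unscanned suffix `c :: rest`
-- (seg.startswith(inner_sep, i) = sep.isPrefixOf on the suffix, i += … = drop), `cur` holds the
-- pending token's characters (Source B keeps them as a piece list and joins on emit), `out` the
-- emitted tokens; fuel = |seg|+1 makes the loop structural (it never runs out when sep ≠ [],
-- since every iteration consumes at least one character).
def altTokGo (mode : List Char) (sep : List Char) : Nat → List Char → List Char → List (List Char) → List (List Char)
  | _, [], cur, out => if cur.isEmpty then out else out ++ [cur]
  | 0, _ :: _, _, out => out  -- fuel exhausted: unreachable for sep ≠ []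
  | fuel+1, c :: rest, cur, out =>
    if sep.isPrefixOf (c :: rest) then
      altTokGo mode sep fuel ((c :: rest).drop sep.length)
        (if mode = "RIGHT".toList then sep else [])
        (if mode = "LEFT".toList then out ++ [cur ++ sep]
         else if cur.isEmpty then out else out ++ [cur])
    else altTokGo mode sep fuel rest (cur ++ [c]) out

def subsplit_py_alt (string : String) (outer_sep : String) (inner_sep : String) (keep_inner : String) : List String :=
  if outer_sep.toList.isEmpty || inner_sep.toList.isEmpty then []  -- B raises ValueError; excluded by Pre_
  else
    ((PySem.Chars.splitOn string.toList outer_sep.toList).foldl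
      (fun out seg => altTokGo (PySem.Chars.upper keep_inner.toList) inner_sep.toList (seg.length + 1) seg [] out)
      []).map String.ofList

-- ===== PRECONDITION & SPEC =====
-- Pre_ excludes exactly the inputs on which Python's str.split raises ValueError('empty separator').
def Pre_subsplit_py (string : String) (outer_sep : String) (inner_sep : String) (keep_inner : String) : Prop :=
  outer_sep.toList ≠ [] ∧ inner_sep.toList ≠ []
instance (string : String) (outer_sep : String) (inner_sep : String) (keep_inner : String) : Decidable (Pre_subsplit_py string outer_sep inner_sep keep_inner) := by unfold Pre_subsplit_py; infer_instance
def pvWitness_subsplit_py : String × String × String × String := ("a,b;c,", ";", ",", "LEFT")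

def Spec_subsplit_py (string : String) (outer_sep : String) (inner_sep : String) (keep_inner : String) (out : List String) : Prop := out = subsplit_py_alt string outer_sep inner_sep keep_inner
instance (string : String) (outer_sep : String) (inner_sep : String) (keep_inner : String) (out : List String) : Decidable (Spec_subsplit_py string outer_sep inner_sep keep_inner out) := by unfold Spec_subsplit_py; infer_instance

-- ===== CLAIM (what is proved, stated in full; the proofs are below) =====
def Claim_equal_subsplit_py : Prop := ∀ (string : String) (outer_sep : String) (inner_sep : String) (keep_inner : String), Dom_subsplit_py string outer_sep inner_sep keep_inner → Pre_subsplit_py string outer_sep inner_sep keep_inner → Spec_subsplit_py string outer_sep inner_sep keep_inner (subsplit_py string outer_sep inner_sep keep_inner)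

-- ===== LEMMAS AND PROOFS =====

-- A's per-segment value, phrased as a structural recursion (LEFT resp. RIGHT keep_inner).
def pvFL (sep : List Char) : List (List Char) → List (List Char)
  | [] => []
  | [x] => if x.isEmpty then [] else [x]
  | x :: y :: ys => (x ++ sep) :: pvFL sep (y :: ys)

def pvFR (sep : List Char) : List (List Char) → List (List Char)
  | [] => []
  | x :: xs => (if x.isEmpty then [] else [x]) ++ xs.map (fun y => sep ++ y)

theorem pv_go_acc (sep : List Char) : ∀ (fuel : Nat) (l cur : List Char) (acc : List (List Char)),
    PySem.Chars.splitOn.go sep fuel l cur acc = acc.reverse ++ PySem.Chars.splitOn.go sep fuel l cur [] := by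
  intro fuel
  induction fuel with
  | zero => intro l cur acc; simp [PySem.Chars.splitOn.go]
  | succ n ih =>
    intro l cur acc
    cases l with
    | nil => simp [PySem.Chars.splitOn.go]
    | cons c rest =>
      simp only [PySem.Chars.splitOn.go]
      split_ifs with h
      · rw [ih _ _ (cur.reverse :: acc), ih _ _ [cur.reverse]]
        simp
      · exact ih _ _ acc

theorem pv_go_ne_nil (sep : List Char) : ∀ (fuel : Nat) (l cur : List Char) (acc : List (List Char)),
    PySem.Chars.splitOn.go sep fuel l cur acc ≠ [] := by
  intro fuel
  induction fuel with
  | zero => intro l cur acc; simp [PySem.Chars.splitOn.go]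
  | succ n ih =>
    intro l cur acc
    cases l with
    | nil => simp [PySem.Chars.splitOn.go]
    | cons c rest =>
      simp only [PySem.Chars.splitOn.go]
      split_ifs with h
      · exact ih _ _ _
      · exact ih _ _ _

theorem pv_altTokGo_out (mode sep : List Char) : ∀ (fuel : Nat) (l cur : List Char) (out : List (List Char)),
    altTokGo mode sep fuel l cur out = out ++ altTokGo mode sep fuel l cur [] := by
  intro fuel
  induction fuel with
  | zero =>
    intro l cur out
    cases l <;> simp [altTokGo] <;> split_ifs <;> simp
  | succ n ih =>
    intro l cur out
    cases l with
    | nil => simp only [altTokGo]; split_ifs <;> simp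
    | cons c rest =>
      by_cases h : sep.isPrefixOf (c :: rest)
      · simp only [altTokGo, if_pos h]
        rw [ih _ _ (if mode = "LEFT".toList then out ++ [cur ++ sep] else if cur.isEmpty then out else out ++ [cur]),
            ih _ _ (if mode = "LEFT".toList then [] ++ [cur ++ sep] else if cur.isEmpty then [] else [] ++ [cur])]
        split_ifs <;> simp
      · simp only [altTokGo, if_neg h]; exact ih _ _ _

theorem pv_alt_left (sep : List Char) (hsep : sep ≠ []) : ∀ (fuel : Nat) (l cur : List Char), l.length < fuel →
    altTokGo ("LEFT".toList) sep fuel l cur.reverse [] = pvFL sep (PySem.Chars.splitOn.go sep fuel l cur []) := by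
  intro fuel
  induction fuel with
  | zero => intro l cur h; omega
  | succ n ih =>
    intro l cur h
    cases l with
    | nil => simp [altTokGo, PySem.Chars.splitOn.go, pvFL]
    | cons c rest =>
      by_cases hp : sep.isPrefixOf (c :: rest)
      · have hd : ((c :: rest).drop sep.length).length < n := by
          have h1 : 1 ≤ sep.length := List.length_pos_iff.mpr hsep
          simp only [List.length_drop, List.length_cons]
          simp only [List.length_cons] at h
          omega
        simp only [altTokGo, if_pos hp, PySem.Chars.splitOn.go]
        have h1 : ("LEFT".toList : List Char) ≠ "RIGHT".toList := by decide
        rw [if_neg h1]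
        simp only [if_true, List.nil_append]
        rw [pv_altTokGo_out, pv_go_acc]
        have hih := ih ((c :: rest).drop sep.length) [] hd
        simp only [List.reverse_nil] at hih
        rw [hih]
        rcases hG : PySem.Chars.splitOn.go sep n ((c :: rest).drop sep.length) [] [] with _ | ⟨g, gs⟩
        · exact absurd hG (pv_go_ne_nil sep n _ [] [])
        · simp [pvFL]
      · simp only [altTokGo, if_neg hp, PySem.Chars.splitOn.go]
        have : cur.reverse ++ [c] = (c :: cur).reverse := by simp
        have hr : rest.length < n := by simp only [List.length_cons] at h; omega
        rw [this, ih _ _ hr]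

theorem pv_alt_right_later (sep : List Char) (hsep : sep ≠ []) : ∀ (fuel : Nat) (l cur : List Char), l.length < fuel →
    altTokGo ("RIGHT".toList) sep fuel l (sep ++ cur.reverse) [] = (PySem.Chars.splitOn.go sep fuel l cur []).map (fun y => sep ++ y) := by
  intro fuel
  induction fuel with
  | zero => intro l cur h; omega
  | succ n ih =>
    intro l cur h
    cases l with
    | nil =>
      have : (sep ++ cur.reverse).isEmpty = false := by
        simp [List.isEmpty_eq_false_iff, hsep]
      simp [altTokGo, PySem.Chars.splitOn.go, this]
    | cons c rest =>
      by_cases hp : sep.isPrefixOf (c :: rest)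
      · have hd : ((c :: rest).drop sep.length).length < n := by
          have h1 : 1 ≤ sep.length := List.length_pos_iff.mpr hsep
          simp only [List.length_drop, List.length_cons]
          simp only [List.length_cons] at h
          omega
        simp only [altTokGo, if_pos hp, PySem.Chars.splitOn.go]
        have h1 : ("RIGHT".toList : List Char) ≠ "LEFT".toList := by decide
        have hne : (sep ++ cur.reverse).isEmpty = false := by
          simp [List.isEmpty_eq_false_iff, hsep]
        rw [if_neg h1]
        simp only [if_true, hne, Bool.false_eq_true, if_false, List.nil_append]
        rw [pv_altTokGo_out, pv_go_acc]
        have hih := ih ((c :: rest).drop sep.length) [] hd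
        simp only [List.reverse_nil, List.append_nil] at hih
        rw [hih]
        simp
      · simp only [altTokGo, if_neg hp, PySem.Chars.splitOn.go]
        have hr : rest.length < n := by simp only [List.length_cons] at h; omega
        have : (sep ++ cur.reverse) ++ [c] = sep ++ (c :: cur).reverse := by simp
        rw [this, ih _ _ hr]

theorem pv_alt_right (sep : List Char) (hsep : sep ≠ []) : ∀ (fuel : Nat) (l cur : List Char), l.length < fuel →
    altTokGo ("RIGHT".toList) sep fuel l cur.reverse [] = pvFR sep (PySem.Chars.splitOn.go sep fuel l cur []) := by
  intro fuel
  induction fuel with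
  | zero => intro l cur h; omega
  | succ n ih =>
    intro l cur h
    cases l with
    | nil => simp [altTokGo, PySem.Chars.splitOn.go, pvFR]
    | cons c rest =>
      by_cases hp : sep.isPrefixOf (c :: rest)
      · have hd : ((c :: rest).drop sep.length).length < n := by
          have h1 : 1 ≤ sep.length := List.length_pos_iff.mpr hsep
          simp only [List.length_drop, List.length_cons]
          simp only [List.length_cons] at h
          omega
        simp only [altTokGo, if_pos hp, PySem.Chars.splitOn.go]
        have h1 : ("RIGHT".toList : List Char) ≠ "LEFT".toList := by decide
        rw [if_neg h1]
        simp only [if_true, List.nil_append]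
        rw [pv_altTokGo_out, pv_go_acc]
        have hih := pv_alt_right_later sep hsep n ((c :: rest).drop sep.length) [] hd
        simp only [List.reverse_nil, List.append_nil] at hih
        rw [hih]
        simp [pvFR]
      · simp only [altTokGo, if_neg hp, PySem.Chars.splitOn.go]
        have hr : rest.length < n := by simp only [List.length_cons] at h; omega
        have : cur.reverse ++ [c] = (c :: cur).reverse := by simp
        rw [this, ih _ _ hr]

theorem pv_alt_none (mode sep : List Char) (hsep : sep ≠ [])
    (hL : mode ≠ "LEFT".toList) (hR : mode ≠ "RIGHT".toList) :
    ∀ (fuel : Nat) (l cur : List Char), l.length < fuel →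
    altTokGo mode sep fuel l cur.reverse [] = (PySem.Chars.splitOn.go sep fuel l cur []).filter (fun x => !x.isEmpty) := by
  intro fuel
  induction fuel with
  | zero => intro l cur h; omega
  | succ n ih =>
    intro l cur h
    cases l with
    | nil => rcases cur with _ | ⟨x, xs⟩ <;> simp [altTokGo, PySem.Chars.splitOn.go, List.filter]
    | cons c rest =>
      by_cases hp : sep.isPrefixOf (c :: rest)
      · have hd : ((c :: rest).drop sep.length).length < n := by
          have h1 : 1 ≤ sep.length := List.length_pos_iff.mpr hsep
          simp only [List.length_drop, List.length_cons]
          simp only [List.length_cons] at h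
          omega
        simp only [altTokGo, if_pos hp, PySem.Chars.splitOn.go]
        rw [if_neg hR, if_neg hL]
        rw [pv_altTokGo_out, pv_go_acc]
        have hih := ih ((c :: rest).drop sep.length) [] hd
        simp only [List.reverse_nil] at hih
        rw [hih]
        by_cases hc : cur.reverse.isEmpty <;> simp [hc, List.filter]
      · simp only [altTokGo, if_neg hp, PySem.Chars.splitOn.go]
        have hr : rest.length < n := by simp only [List.length_cons] at h; omega
        have : cur.reverse ++ [c] = (c :: cur).reverse := by simp
        rw [this, ih _ _ hr]

theorem pv_getLastD_congr {α : Type} (l : List α) (h : l ≠ []) (d₁ d₂ : α) : l.getLastD d₁ = l.getLastD d₂ := by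
  cases l with
  | nil => exact absurd rfl h
  | cons z zs =>
    obtain ⟨a, ha⟩ := Option.isSome_iff_exists.mp (List.getLast?_isSome.mpr h)
    simp [List.getLastD_eq_getLast?, ha]

-- A's LEFT transform (append sep everywhere, un-append it on the last part, drop empties) is pvFL.
theorem pv_left_eq (sep : List Char) (hsep : sep ≠ []) : ∀ (parts : List (List Char)), parts ≠ [] →
    (((parts.map (fun x => x ++ sep)).dropLast
      ++ [PySem.List.slice ((parts.map (fun x => x ++ sep)).getLastD []) none (some (-(sep.length : Int)))]).filter
        (fun x => !x.isEmpty)) = pvFL sep parts := by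
  have hk : 0 < sep.length := List.length_pos_iff.mpr hsep
  intro parts
  induction parts with
  | nil => intro h; exact absurd rfl h
  | cons x xs ih =>
    intro _
    cases xs with
    | nil =>
      simp only [List.map_cons, List.map_nil, List.dropLast, List.getLastD_cons, List.getLastD_nil,
        List.nil_append, PySem.List.slice_to_neg_natCast _ _ hk]
      have : (x ++ sep).take ((x ++ sep).length - sep.length) = x := by
        simp [List.length_append]
      rw [this]
      cases x <;> simp [pvFL, List.filter]
    | cons y ys =>
      simp only [List.map_cons] at ih ⊢
      rw [List.dropLast_cons_of_ne_nil (by simp), List.getLastD_cons]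
      rw [pv_getLastD_congr _ (by simp) (x ++ sep) []]
      have hxne : (x ++ sep).isEmpty = false := by
        simp [List.isEmpty_eq_false_iff, hsep]
      simp only [List.cons_append, List.filter, hxne, Bool.not_false]
      rw [ih (by simp)]
      simp [pvFL]

-- A's RIGHT transform (prepend sep everywhere, un-prepend it on the first part, drop empties) is pvFR.
theorem pv_right_eq (sep : List Char) (hsep : sep ≠ []) : ∀ (parts : List (List Char)), parts ≠ [] →
    ((match parts.map (fun x => sep ++ x) with
      | [] => ([] : List (List Char))
      | h :: t => PySem.List.slice h (some (sep.length : Int)) none :: t).filter (fun x => !x.isEmpty)) = pvFR sep parts := by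
  intro parts hne
  cases parts with
  | nil => exact absurd rfl hne
  | cons x xs =>
    simp only [List.map_cons]
    rw [PySem.List.slice_from_natCast]
    have hx : (sep ++ x).drop sep.length = x := by simp
    rw [hx]
    have hall : (xs.map (fun y => sep ++ y)).filter (fun x => !x.isEmpty) = xs.map (fun y => sep ++ y) := by
      apply List.filter_eq_self.mpr
      intro a ha
      rcases List.mem_map.mp ha with ⟨y, _, rfl⟩
      simp [List.isEmpty_eq_false_iff, hsep]
    cases hxe : x.isEmpty <;> simp [List.filter, hall, pvFR, hxe]

-- per segment: B's scan equals A's transform of str.split, for every keep_inner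
theorem pv_seg (mode sep : List Char) (hsep : sep ≠ []) (seg : List Char) :
    altTokGo mode sep (seg.length + 1) seg [] [] =
      (if mode = "LEFT".toList then
        ((PySem.Chars.splitOn seg sep).map (fun x => x ++ sep)).dropLast
          ++ [PySem.List.slice (((PySem.Chars.splitOn seg sep).map (fun x => x ++ sep)).getLastD []) none (some (-(sep.length : Int)))]
       else if mode = "RIGHT".toList then
        (match (PySem.Chars.splitOn seg sep).map (fun x => sep ++ x) with
         | [] => ([] : List (List Char))
         | h :: t => PySem.List.slice h (some (sep.length : Int)) none :: t)
       else PySem.Chars.splitOn seg sep).filter (fun x => !x.isEmpty) := by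
  have hlen : seg.length < seg.length + 1 := by omega
  have hnil : PySem.Chars.splitOn seg sep ≠ [] := pv_go_ne_nil sep _ _ _ _
  by_cases hL : mode = "LEFT".toList
  · subst hL
    rw [if_pos rfl, pv_left_eq sep hsep _ hnil]
    have := pv_alt_left sep hsep (seg.length+1) seg [] hlen
    simpa [PySem.Chars.splitOn] using this
  · by_cases hR : mode = "RIGHT".toList
    · subst hR
      rw [if_neg hL, if_pos rfl, pv_right_eq sep hsep _ hnil]
      have := pv_alt_right sep hsep (seg.length+1) seg [] hlen
      simpa [PySem.Chars.splitOn] using this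
    · rw [if_neg hL, if_neg hR]
      have := pv_alt_none mode sep hsep hL hR (seg.length+1) seg [] hlen
      simpa [PySem.Chars.splitOn] using this

-- ===== VERDICT (by name: the statement is the Claim_ definition above) =====
theorem subsplit_py_spec : Claim_equal_subsplit_py := by
  intro s osep isep ki _ hpre
  obtain ⟨ho, hi⟩ := hpre
  unfold Spec_subsplit_py
  have hoe : osep.toList.isEmpty = false := by simp [List.isEmpty_eq_false_iff, ho]
  have hie : isep.toList.isEmpty = false := by simp [List.isEmpty_eq_false_iff, hi]
  unfold subsplit_py subsplit_py_alt
  simp only [PySem.Chars.split?, hoe, hie, Bool.false_eq_true, if_false, Bool.or_self]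
  congr 1
  have key : ∀ (outers : List (List Char)) (acc : List (List Char)),
      outers.foldl (fun result outer =>
        result ++
          List.filter (fun x => !x.isEmpty)
            (if PySem.Chars.upper ki.toList = "LEFT".toList then
              (List.map (fun x => x ++ isep.toList) (PySem.Chars.splitOn outer isep.toList)).dropLast ++
                [PySem.List.slice
                    ((List.map (fun x => x ++ isep.toList) (PySem.Chars.splitOn outer isep.toList)).getLastD []) none
                    (some (-(isep.toList.length : Int)))]
            else
              if PySem.Chars.upper ki.toList = "RIGHT".toList then
                match List.map (fun x => isep.toList ++ x) (PySem.Chars.splitOn outer isep.toList) with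
                | [] => []
                | h :: t => PySem.List.slice h (some (isep.toList.length : Int)) none :: t
              else PySem.Chars.splitOn outer isep.toList)) acc
      = outers.foldl (fun out seg => altTokGo (PySem.Chars.upper ki.toList) isep.toList (seg.length + 1) seg [] out) acc := by
    intro outers
    induction outers with
    | nil => intro acc; rfl
    | cons seg rest ihs =>
      intro acc
      simp only [List.foldl_cons]
      rw [ihs]
      congr 1
      rw [pv_altTokGo_out, pv_seg _ _ hi seg]
  exact key _ []
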